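-- pv_equiv track=rewrite | github.com/zofialuther/CS8395-08-Paper1-updated | data/translated-code/direct-translations/prolog-to-python/Digital-root.py | digit_sum_helper
-- ===== SOURCE A (Python) =====
-- def digit_sum_helper(N, Base, Sum, S1):
--     if N < Base:
--         return S1 + N
--     else:
--         M = N // Base
--         Digit = N % Base
--         S2 = S1 + Digit
--         return digit_sum_helper(M, Base, Sum, S2)
-- ===== SOURCE B (Python) =====
-- def digit_sum_helper(N, Base, Sum, S1):
--     # Iterative: running accumulator, while loop instead of tail recursion.
--     total = S1
--     while N >= Base:
--         total += N % Base
--         N //= Base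
--     return total + N
-- ===== Notes on version B (the rewrite author's own statement) =====
-- stated objective: simpler
-- what changed: Replaced the accumulator-carrying tail recursion by an iterative while loop that adds N % Base to a running total and floor-divides N until N < Base.
import Mathlib
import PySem

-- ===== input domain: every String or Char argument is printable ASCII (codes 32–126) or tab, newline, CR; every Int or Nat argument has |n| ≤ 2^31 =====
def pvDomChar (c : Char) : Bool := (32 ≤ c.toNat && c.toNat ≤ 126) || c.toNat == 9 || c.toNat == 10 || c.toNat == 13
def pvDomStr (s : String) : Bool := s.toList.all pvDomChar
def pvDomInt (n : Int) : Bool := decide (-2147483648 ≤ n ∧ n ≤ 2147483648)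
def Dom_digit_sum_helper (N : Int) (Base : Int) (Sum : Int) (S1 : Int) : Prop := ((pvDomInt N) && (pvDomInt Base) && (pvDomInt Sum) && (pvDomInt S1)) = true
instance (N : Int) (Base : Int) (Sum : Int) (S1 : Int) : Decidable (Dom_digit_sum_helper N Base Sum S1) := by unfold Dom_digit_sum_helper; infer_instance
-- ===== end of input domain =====

-- B replaces A's accumulator-carrying tail recursion by an iterative while loop
-- with a running total (different decomposition, same cost).

-- termination measure lemma for port A, cited by its decreasing_by
theorem dsh_dec (N Base : Int) (h1 : ¬ N < Base)
    (h2 : ¬ (Base ≤ 1 ∧ ¬ (Base ≤ -1 ∧ Base * Base < N))) :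
    (PySem.Int.floordiv N Base).toNat < N.toNat := by
  have hqr := PySem.Int.floordiv_mul_add_mod N Base
  by_cases hb : Base < 0
  · have hBB : Base * Base < N := by
      by_cases h : Base ≤ -1 ∧ Base * Base < N
      · exact h.2
      · exact absurd ⟨by omega, h⟩ h2
    have hN2 : 0 < N := by nlinarith
    have hm := PySem.Int.mod_neg_bounds N (show Base < 0 by omega)
    have hneg : PySem.Int.floordiv N Base < 0 := by nlinarith [hm.1, hm.2]
    omega
  · have hB2 : 2 ≤ Base := by
      by_cases h : Base ≤ 1
      · exact absurd ⟨h, fun hx => by omega⟩ h2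
      · omega
    have hm0 := PySem.Int.mod_nonneg N (show 0 < Base by omega)
    have hm1 := PySem.Int.mod_lt N (show 0 < Base by omega)
    have hq0 : 0 ≤ PySem.Int.floordiv N Base := by nlinarith
    have hqN : PySem.Int.floordiv N Base < N := by nlinarith
    omega

-- ===== PORT A =====
-- The 'else if' branch is a totality guard only: there Python A never returns
-- (RecursionError / ZeroDivisionError), i.e. that branch lies outside Pre_.
def digit_sum_helper (N : Int) (Base : Int) (Sum : Int) (S1 : Int) : Int :=
  if N < Base then S1 + N
  else if Base ≤ 1 ∧ ¬ (Base ≤ -1 ∧ Base * Base < N) then 0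
  else
    let M := PySem.Int.floordiv N Base
    let Digit := PySem.Int.mod N Base
    let S2 := S1 + Digit
    digit_sum_helper M Base Sum S2
termination_by N.toNat
decreasing_by exact dsh_dec N Base ‹_› ‹_›

-- ===== PORT B =====
-- Source B's while loop, made total by a fuel counter (a totality guard only:
-- inside Pre_ on Dom at most 33 iterations happen, and 64 ≥ that).
def dshLoop : Nat → Int → Int → Int → Int
  | 0, n, _, total => total + n
  | fuel + 1, n, base, total =>
    if n < base then total + n
    else dshLoop fuel (PySem.Int.floordiv n base) base (total + PySem.Int.mod n base)

def digit_sum_helper_alt (N : Int) (Base : Int) (Sum : Int) (S1 : Int) : Int :=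
  dshLoop 64 N Base S1

-- ===== PRECONDITION & SPEC =====
-- Pre_ is exactly the set of inputs on which the Python A returns normally:
-- for Base ≤ 1 the recursion terminates only when N < Base (one immediate return)
-- or when Base ≤ -1 and N > Base², where the quotient drops below Base in one step;
-- everywhere else A hits RecursionError (Base = 1, or Base ≤ -1 with Base ≤ N ≤ Base²)
-- or ZeroDivisionError (Base = 0, N ≥ 0).
def Pre_digit_sum_helper (N : Int) (Base : Int) (Sum : Int) (S1 : Int) : Prop :=
  2 ≤ Base ∨ N < Base ∨ (Base ≤ -1 ∧ Base * Base < N)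
instance (N : Int) (Base : Int) (Sum : Int) (S1 : Int) : Decidable (Pre_digit_sum_helper N Base Sum S1) := by unfold Pre_digit_sum_helper; infer_instance
def pvWitness_digit_sum_helper : Int × Int × Int × Int := (101, 10, 0, 0)

def Spec_digit_sum_helper (N : Int) (Base : Int) (Sum : Int) (S1 : Int) (out : Int) : Prop := out = digit_sum_helper_alt N Base Sum S1
instance (N : Int) (Base : Int) (Sum : Int) (S1 : Int) (out : Int) : Decidable (Spec_digit_sum_helper N Base Sum S1 out) := by unfold Spec_digit_sum_helper; infer_instance

-- ===== CLAIM (what is proved, stated in full; the proofs are below) =====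
def Claim_equal_digit_sum_helper : Prop := ∀ (N : Int) (Base : Int) (Sum : Int) (S1 : Int), Dom_digit_sum_helper N Base Sum S1 → Pre_digit_sum_helper N Base Sum S1 → Spec_digit_sum_helper N Base Sum S1 (digit_sum_helper N Base Sum S1)

-- ===== LEMMAS AND PROOFS =====

theorem dsh_base (N Base Sum S1 : Int) (h : N < Base) :
    digit_sum_helper N Base Sum S1 = S1 + N := by
  rw [digit_sum_helper.eq_def, if_pos h]

theorem dsh_step (N Base Sum S1 : Int) (h1 : ¬ N < Base)
    (h2 : ¬ (Base ≤ 1 ∧ ¬ (Base ≤ -1 ∧ Base * Base < N))) :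
    digit_sum_helper N Base Sum S1
      = digit_sum_helper (PySem.Int.floordiv N Base) Base Sum (S1 + PySem.Int.mod N Base) := by
  rw [digit_sum_helper.eq_def, if_neg h1, if_neg h2]

-- enough fuel (N.toNat < 2^fuel) makes B's loop compute A's recursion
theorem dshLoop_eq (fuel : Nat) (N Base Sum S1 : Int)
    (hp : Pre_digit_sum_helper N Base Sum S1) (hf : N.toNat < 2 ^ fuel) :
    dshLoop fuel N Base S1 = digit_sum_helper N Base Sum S1 := by
  induction fuel generalizing N S1 with
  | zero =>
    have hN0 : N ≤ 0 := by simp at hf; omega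
    by_cases h1 : N < Base
    · rw [dsh_base N Base Sum S1 h1]; rfl
    · exfalso
      rcases hp with h | h | h
      · omega
      · exact h1 h
      · nlinarith [h.1, h.2]
  | succ fuel ih =>
    by_cases h1 : N < Base
    · rw [dsh_base N Base Sum S1 h1]
      simp [dshLoop, h1]
    · have h2 : ¬ (Base ≤ 1 ∧ ¬ (Base ≤ -1 ∧ Base * Base < N)) := by
        rcases hp with h | h | h
        · exact fun hx => by omega
        · exact absurd h h1
        · exact fun hx => hx.2 h
      have hqr := PySem.Int.floordiv_mul_add_mod N Base
      have hp' : Pre_digit_sum_helper (PySem.Int.floordiv N Base) Base Sum (S1 + PySem.Int.mod N Base) := by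
        by_cases hB : 2 ≤ Base
        · exact Or.inl hB
        · have hc : Base ≤ -1 ∧ Base * Base < N := by
            by_cases h : Base ≤ -1 ∧ Base * Base < N
            · exact h
            · exact absurd ⟨by omega, h⟩ h2
          refine Or.inr (Or.inl ?_)
          have hm := PySem.Int.mod_neg_bounds N (show Base < 0 by omega)
          nlinarith [hm.1, hm.2, hc.2]
      have hf' : (PySem.Int.floordiv N Base).toNat < 2 ^ fuel := by
        by_cases hB : 2 ≤ Base
        · have hm0 := PySem.Int.mod_nonneg N (show 0 < Base by omega)
          have hm1 := PySem.Int.mod_lt N (show 0 < Base by omega)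
          have hq0 : 0 ≤ PySem.Int.floordiv N Base := by nlinarith
          have h2q : 2 * PySem.Int.floordiv N Base ≤ N := by nlinarith
          have := pow_succ 2 fuel
          omega
        · have hc : Base ≤ -1 ∧ Base * Base < N := by
            by_cases h : Base ≤ -1 ∧ Base * Base < N
            · exact h
            · exact absurd ⟨by omega, h⟩ h2
          have hm := PySem.Int.mod_neg_bounds N (show Base < 0 by omega)
          have hneg : PySem.Int.floordiv N Base < 0 := by nlinarith [hm.1, hm.2, hc.2]
          have : (PySem.Int.floordiv N Base).toNat = 0 := by omega
          rw [this]; positivity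
      rw [dsh_step N Base Sum S1 h1 h2]
      simp only [dshLoop, if_neg h1]
      exact ih (PySem.Int.floordiv N Base) (S1 + PySem.Int.mod N Base) hp' hf'

-- ===== VERDICT (by name: the statement is the Claim_ definition above) =====
theorem digit_sum_helper_spec : Claim_equal_digit_sum_helper := by
  intro N Base Sum S1 hd hp
  unfold Spec_digit_sum_helper digit_sum_helper_alt
  have hN : N.toNat < 2 ^ 64 := by
    simp only [Dom_digit_sum_helper, pvDomInt, Bool.and_eq_true, decide_eq_true_eq] at hd
    have := hd.1.1.1
    norm_num
    omega
  exact (dshLoop_eq 64 N Base Sum S1 hp hN).symm
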